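-- pv_equiv track=rewrite | github.com/PrabhbirJ/RNN | rnnWord.py | tokenize_titles
-- ===== SOURCE A (Python) =====
-- def tokenize_titles(titles):
--     """Convert titles to word tokens"""
--     word_vocab = set()
--     tokenized = []
--
--     for title in titles:
--         # Split into words (handles punctuation attached to words)
--         words = title.split()
--         # Filter out empty strings
--         words = [w for w in words if w.strip()]
--         tokenized.append(words)
--         word_vocab.update(words)
--
--     return tokenized, sorted(list(word_vocab))
-- ===== SOURCE B (Python) =====
-- def _uniq(ws):
--     """Collapse adjacent duplicates of a sorted list in one scan."""
--     out = []
--     for w in ws: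
--         if not out or out[-1] != w:
--             out.append(w)
--     return out
--
--
-- def tokenize_titles(titles):
--     """Convert titles to word tokens"""
--     # str.split() never yields empty or whitespace tokens, so no filter is needed.
--     tokenized = [title.split() for title in titles]
--     # Vocabulary without a set: sort ALL tokens (with duplicates), then
--     # collapse the now-adjacent duplicates in a single scan.
--     all_words = sorted(w for ws in tokenized for w in ws)
--     return tokenized, _uniq(all_words)
-- ===== Notes on version B (the rewrite author's own statement) =====
-- stated objective: alternative
-- what changed: B builds no set and drops the no-op strip filter: it splits every title, then sorts ALL tokens (with duplicates) and collapses the now-adjacent duplicates in a single scan to get the vocabulary.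
import Mathlib
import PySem

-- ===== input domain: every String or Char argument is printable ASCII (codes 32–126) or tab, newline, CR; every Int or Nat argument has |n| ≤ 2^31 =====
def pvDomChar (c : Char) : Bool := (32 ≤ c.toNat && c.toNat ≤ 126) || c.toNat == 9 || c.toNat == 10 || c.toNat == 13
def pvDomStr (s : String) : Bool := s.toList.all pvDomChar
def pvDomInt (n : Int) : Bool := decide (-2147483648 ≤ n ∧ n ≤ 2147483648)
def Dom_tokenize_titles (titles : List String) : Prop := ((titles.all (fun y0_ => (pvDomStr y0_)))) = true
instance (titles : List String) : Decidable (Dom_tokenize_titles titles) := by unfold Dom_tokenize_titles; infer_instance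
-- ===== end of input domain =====

-- B drops A's set: it splits each title, then sorts ALL tokens and collapses the adjacent duplicates in one scan — an alternative vocabulary algorithm, same cost.


-- ===== PORT A =====
def tokenize_titles (titles : List String) : List (List String) × List String :=
  let st := titles.foldl
    (fun (st : PySem.Set String × List (List String)) title =>
      let words := PySem.Str.split₀ title
      let words := words.filter (fun w => decide (PySem.Str.strip w ≠ ""))
      (PySem.Set.update st.1 words, st.2 ++ [words]))
    (PySem.Set.empty, [])
  (st.2, PySem.List.sorted st.1 (fun x => x) false)

-- ===== PORT B =====
-- _uniq: 'for w in ws: if not out or out[-1] != w: out.append(w)'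
def pvUniq (ws : List String) : List String :=
  ws.foldl
    (fun out w =>
      if out = [] ∨ PySem.List.pyGet? out (-1) ≠ some w then out ++ [w] else out)
    []

def tokenize_titles_alt (titles : List String) : List (List String) × List String :=
  let tokenized := titles.map (fun title => PySem.Str.split₀ title)
  let all_words := PySem.List.sorted (tokenized.flatMap (fun ws => ws)) (fun x => x) false
  (tokenized, pvUniq all_words)

-- ===== PRECONDITION & SPEC =====
def Spec_tokenize_titles (titles : List String) (out : List (List String) × List String) : Prop := out = tokenize_titles_alt titles
instance (titles : List String) (out : List (List String) × List String) : Decidable (Spec_tokenize_titles titles out) := by unfold Spec_tokenize_titles; infer_instance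

-- ===== CLAIM (what is proved, stated in full; the proofs are below) =====
def Claim_equal_tokenize_titles : Prop := ∀ (titles : List String), Dom_tokenize_titles titles → Spec_tokenize_titles titles (tokenize_titles titles)

-- ===== LEMMAS AND PROOFS =====

-- every token produced by Chars.split₀ is nonempty and whitespace-free
theorem pv_go_good (s : List Char) : ∀ (cur : List Char) (acc : List (List Char)),
    (∀ c ∈ cur, PySem.Chars.isspace c = false) →
    (∀ w ∈ acc, w ≠ [] ∧ ∀ c ∈ w, PySem.Chars.isspace c = false) →
    ∀ w ∈ PySem.Chars.split₀.go s cur acc, w ≠ [] ∧ ∀ c ∈ w, PySem.Chars.isspace c = false := by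
  induction s with
  | nil =>
    intro cur acc hcur hacc w hw
    simp only [PySem.Chars.split₀.go] at hw
    by_cases hc : cur.isEmpty
    · rw [if_pos hc] at hw
      exact hacc w (List.mem_reverse.mp hw)
    · rw [if_neg hc] at hw
      rcases List.mem_cons.mp (List.mem_reverse.mp hw) with h | h
      · subst h
        refine ⟨?_, fun c hcm => hcur c (List.mem_reverse.mp hcm)⟩
        intro hnil
        have : cur = [] := by simpa using congrArg List.reverse hnil
        simp [this] at hc
      · exact hacc w h
  | cons c rest ih =>
    intro cur acc hcur hacc w hw
    simp only [PySem.Chars.split₀.go] at hw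
    by_cases hsp : PySem.Chars.isspace c = true
    · rw [if_pos hsp] at hw
      by_cases hc : cur.isEmpty
      · rw [if_pos hc] at hw
        exact ih [] acc (by simp) hacc w hw
      · rw [if_neg hc] at hw
        refine ih [] (cur.reverse :: acc) (by simp) ?_ w hw
        intro v hv
        rcases List.mem_cons.mp hv with h | h
        · subst h
          refine ⟨?_, fun d hd => hcur d (List.mem_reverse.mp hd)⟩
          intro hnil
          have : cur = [] := by simpa using congrArg List.reverse hnil
          simp [this] at hc
        · exact hacc v h
    · rw [if_neg hsp] at hw
      refine ih (c :: cur) acc ?_ hacc w hw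
      intro d hd
      rcases List.mem_cons.mp hd with h | h
      · subst h; simpa using hsp
      · exact hcur d h

theorem pv_split₀_good (s : String) :
    ∀ w ∈ PySem.Str.split₀ s, w.toList ≠ [] ∧ ∀ c ∈ w.toList, PySem.Chars.isspace c = false := by
  intro w hw
  have h : w.toList ∈ PySem.Chars.split₀ s.toList := by
    rw [← PySem.Str.split₀_map_toList]
    exact List.mem_map_of_mem hw
  exact pv_go_good s.toList [] [] (by simp) (by simp) w.toList
    (by simpa [PySem.Chars.split₀] using h)

theorem pv_strip_ne (w : String) (h1 : w.toList ≠ [])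
    (h2 : ∀ c ∈ w.toList, PySem.Chars.isspace c = false) :
    PySem.Str.strip w ≠ "" := by
  intro h
  have ht : PySem.Chars.strip w.toList = [] := by
    rw [← PySem.Str.toList_strip, h]
    rfl
  have hl : PySem.Chars.lstrip w.toList = w.toList := by
    cases hwl : w.toList with
    | nil => exact absurd hwl h1
    | cons c cs =>
      have hc : PySem.Chars.isspace c = false := h2 c (by rw [hwl]; exact List.mem_cons_self ..)
      simp [PySem.Chars.lstrip, hc]
  have hr : PySem.Chars.rstrip w.toList = w.toList := by
    cases hwr : w.toList.reverse with
    | nil => exact absurd (by simpa using congrArg List.reverse hwr) h1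
    | cons c cs =>
      have hcm : c ∈ w.toList := List.mem_reverse.mp (by rw [hwr]; exact List.mem_cons_self ..)
      have hc : PySem.Chars.isspace c = false := h2 c hcm
      simp [PySem.Chars.rstrip, hwr, hc]
      exact (by simpa using congrArg List.reverse hwr : w.toList = cs.reverse ++ [c]).symm
  rw [PySem.Chars.strip, hl, hr] at ht
  exact h1 ht

-- the 'if w.strip()' filter in A is a no-op on str.split() output
theorem pv_filter_id (s : String) :
    (PySem.Str.split₀ s).filter (fun w => decide (PySem.Str.strip w ≠ "")) = PySem.Str.split₀ s := by
  refine List.filter_eq_self.mpr fun w hw => ?_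
  obtain ⟨h1, h2⟩ := pv_split₀_good s w hw
  exact decide_eq_true (pv_strip_ne w h1 h2)

def pvTok (title : String) : List String :=
  (PySem.Str.split₀ title).filter (fun w => decide (PySem.Str.strip w ≠ ""))

theorem pv_foldl_tok (titles : List String) (s : PySem.Set String) (acc : List (List String)) :
    titles.foldl
      (fun (st : PySem.Set String × List (List String)) title =>
        let words := PySem.Str.split₀ title
        let words := words.filter (fun w => decide (PySem.Str.strip w ≠ ""))
        (PySem.Set.update st.1 words, st.2 ++ [words]))
      (s, acc)
    = (PySem.Set.update s (titles.map pvTok).flatten, acc ++ titles.map pvTok) := by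
  induction titles generalizing s acc with
  | nil => simp [PySem.Set.update]
  | cons t ts ih =>
    rw [List.foldl_cons]
    show List.foldl _ (PySem.Set.update s (pvTok t), acc ++ [pvTok t]) ts = _
    rw [ih]
    simp [PySem.Set.update_append]

-- out[-1] of a nonempty list is its last element
theorem pv_pyGet_neg_one {α : Type} (l : List α) (h : l ≠ []) :
    PySem.List.pyGet? l (-1) = l.getLast? := by
  have hlen : 0 < l.length := List.length_pos_iff.mpr h
  simp [PySem.List.pyGet?, PySem.List.pyIdx?]
  rw [if_pos (by omega : 1 ≤ l.length)]
  simp [List.getLast?_eq_getElem?]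

theorem pv_mem_getLast? {α : Type} (l : List α) (b : α) (hb : l.getLast? = some b) : b ∈ l := by
  rw [List.getLast?_eq_getElem?] at hb
  exact List.mem_of_getElem? hb

-- in a strictly increasing list every element is ≤ the last
theorem pv_le_getLast (l : List String) (hpw : l.Pairwise (· < ·)) :
    ∀ a ∈ l, ∀ b, l.getLast? = some b → a ≤ b := by
  induction l with
  | nil => intro a ha; simp at ha
  | cons x xs ih =>
    intro a ha b hb
    cases xs with
    | nil =>
      simp at ha hb
      rw [ha, ← hb]
    | cons y ys =>
      have hb' : (y :: ys).getLast? = some b := by simpa using hb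
      have hbmem : b ∈ y :: ys := pv_mem_getLast? _ _ hb'
      rcases List.mem_cons.mp ha with h | h
      · subst h
        exact le_of_lt ((List.pairwise_cons.mp hpw).1 b hbmem)
      · exact ih (List.pairwise_cons.mp hpw).2 a h b hb'

-- invariant of the one-scan dedup
theorem pv_uniq_invariant (L : List String) : ∀ (out : List String),
    L.Pairwise (· ≤ ·) → out.Pairwise (· < ·) →
    (∀ a ∈ out, ∀ b ∈ L, a ≤ b) →
    (L.foldl (fun out w =>
        if out = [] ∨ PySem.List.pyGet? out (-1) ≠ some w then out ++ [w] else out) out).Pairwise (· < ·)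
    ∧ ∀ x, x ∈ L.foldl (fun out w =>
        if out = [] ∨ PySem.List.pyGet? out (-1) ≠ some w then out ++ [w] else out) out
        ↔ x ∈ out ∨ x ∈ L := by
  induction L with
  | nil =>
    intro out _ hout _
    exact ⟨hout, by simp⟩
  | cons w ws ih =>
    intro out hL hout hle
    simp only [List.foldl_cons]
    obtain ⟨hwle, hLtail⟩ := List.pairwise_cons.mp hL
    by_cases hcond : out = [] ∨ PySem.List.pyGet? out (-1) ≠ some w
    · rw [if_pos hcond]
      have hlt : ∀ a ∈ out, a < w := by
        intro a ha
        rcases eq_or_lt_of_le (hle a ha w (List.mem_cons_self ..)) with heq | h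
        · exfalso
          subst heq
          have hne : out ≠ [] := by intro h0; rw [h0] at ha; simp at ha
          rcases hcond with h0 | hg
          · exact hne h0
          · obtain ⟨l, hl⟩ := Option.isSome_iff_exists.mp
              ((List.getLast?_isSome).mpr hne)
            have h1 : a ≤ l := pv_le_getLast out hout a ha l hl
            have h2 : l ≤ a := hle l (pv_mem_getLast? _ _ hl) a (List.mem_cons_self ..)
            rw [pv_pyGet_neg_one out hne, hl, le_antisymm h2 h1] at hg
            exact hg rfl
        · exact h
      have hout' : (out ++ [w]).Pairwise (· < ·) := by
        rw [List.pairwise_append]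
        refine ⟨hout, by simp, ?_⟩
        intro a ha b hb
        rw [List.mem_singleton] at hb
        subst hb
        exact hlt a ha
      have hle' : ∀ a ∈ out ++ [w], ∀ b ∈ ws, a ≤ b := by
        intro a ha b hb
        rcases List.mem_append.mp ha with h | h
        · exact hle a h b (List.mem_cons_of_mem _ hb)
        · rw [List.mem_singleton] at h
          subst h
          exact hwle b hb
      obtain ⟨p1, p2⟩ := ih (out ++ [w]) hLtail hout' hle'
      refine ⟨p1, fun x => ?_⟩
      rw [p2 x]
      simp only [List.mem_append, List.mem_cons]
      tauto
    · rw [if_neg hcond]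
      have hne : out ≠ [] := fun h0 => hcond (Or.inl h0)
      have hg : PySem.List.pyGet? out (-1) = some w := by
        by_contra hg'
        exact hcond (Or.inr hg')
      have hwmem : w ∈ out := by
        rw [pv_pyGet_neg_one out hne] at hg
        exact pv_mem_getLast? _ _ hg
      obtain ⟨p1, p2⟩ := ih out hLtail hout
        (fun a ha b hb => hle a ha b (List.mem_cons_of_mem _ hb))
      refine ⟨p1, fun x => ?_⟩
      rw [p2 x]
      simp only [List.mem_cons]
      constructor
      · rintro (h | h)
        · exact Or.inl h
        · exact Or.inr (Or.inr h)
      · rintro (h | h | h)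
        · exact Or.inl h
        · subst h; exact Or.inl hwmem
        · exact Or.inr h

theorem pv_vocab_eq (xs : List String) :
    PySem.List.sorted (PySem.Set.ofList xs) (fun x => x) false
      = pvUniq (PySem.List.sorted xs (fun x => x) false) := by
  have hL : (PySem.List.sorted xs (fun x => x) false).Pairwise (· ≤ ·) :=
    PySem.List.sorted_pairwise xs (fun x => x)
  obtain ⟨hpw, hmem⟩ := pv_uniq_invariant (PySem.List.sorted xs (fun x => x) false) []
    hL (by simp) (by simp)
  refine PySem.List.sorted_eq_of_perm_of_pairwise_lt _ _ _ ?_ hpw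
  refine (List.perm_ext_iff_of_nodup (hpw.imp fun h => ne_of_lt h) (PySem.Set.nodup_ofList xs)).mpr ?_
  intro a
  rw [PySem.Set.mem_ofList]
  rw [hmem a]
  simp [PySem.List.mem_sorted]

-- ===== VERDICT (by name: the statement is the Claim_ definition above) =====
theorem tokenize_titles_spec : Claim_equal_tokenize_titles := by
  intro titles _
  unfold Spec_tokenize_titles tokenize_titles tokenize_titles_alt
  rw [pv_foldl_tok]
  have htok : titles.map pvTok = titles.map (fun t => PySem.Str.split₀ t) :=
    List.map_congr_left fun t _ => pv_filter_id t
  have hflat : (titles.map (fun t => PySem.Str.split₀ t)).flatMap (fun ws => ws)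
      = (titles.map (fun t => PySem.Str.split₀ t)).flatten := by
    rw [List.flatMap_def, List.map_id']
  simp only [htok, hflat]
  rw [show PySem.Set.empty.update ((titles.map (fun t => PySem.Str.split₀ t)).flatten)
        = PySem.Set.ofList ((titles.map (fun t => PySem.Str.split₀ t)).flatten) from rfl]
  rw [pv_vocab_eq]
  rfl
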